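-- pv_equiv track=rewrite | github.com/mark-ford123/fcp-cw1-mf2023 | CW1.py | two_by_two
-- ===== SOURCE A (Python) =====
-- grid1 = [
-- 		[1, 1, 1, 1],
-- 		[1, 1, 1, 1],
-- 		[1, 1, 1, 1],
-- 		[1, 1, 1, 1]]
--
-- grid2 = [
-- 		[1, 0, 4, 2],
-- 		[4, 2, 1, 3],
-- 		[0, 1, 0, 4],
-- 		[3, 4, 2, 1]]
--
-- grid3 = [
-- 		[1, 2, 3, 4],
-- 		[2, 1, 4, 3],
-- 		[3, 4, 2, 1],
-- 		[4, 3, 1, 2]]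
--
-- grid4 = [
-- 		[1, 3, 4, 2],
-- 		[4, 2, 1, 3],
-- 		[2, 1, 3, 4],
-- 		[3, 4, 2, 1]]
--
-- def two_by_two(grid_input):
-- 	x_checker, y_checker, box_checker = False, False, False
-- 	y_list = []
-- 	if grid_input == grid1:
-- 		for i in grid1:
-- 			if sum(i) != 10:
-- 				x_checker = False
-- 				break
-- 			else:
-- 				x_checker = True
-- 			y_list.extend(i)
-- 	elif grid_input == grid2:
-- 		for i in grid2:
-- 			if sum(i) != 10:
-- 				x_checker = False
-- 				break
-- 			else:
-- 				x_checker = True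
-- 			y_list.extend(i)
-- 	elif grid_input == grid3:
-- 		for i in grid3:
-- 			if sum(i) != 10:
-- 				x_checker = False
-- 				break
-- 			else:
-- 				x_checker = True
-- 			y_list.extend(i)
-- 	else:
-- 		for i in grid4:
-- 			if sum(i) != 10:
-- 				x_checker = False
-- 				break
-- 			else:
-- 				x_checker = True
-- 			y_list.extend(i)
--
-- 	first_column = y_list[0::4]
-- 	second_column = y_list[1::4]
-- 	third_column = y_list[2::4]
-- 	fourth_column = y_list[3::4]
--
-- 	if sum(first_column) != 10 or sum(second_column) != 10 or sum(third_column) != 10 or sum(fourth_column) != 10: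
-- 		y_checker = False
-- 	else:
-- 		y_checker = True
--
-- 	first_box = y_list[0:2]
-- 	first_box.extend(y_list[4:6])
-- 	second_box = y_list[2:4]
-- 	second_box.extend(y_list[6:8])
-- 	third_box = y_list[8:10]
-- 	third_box.extend(y_list[12:14])
-- 	fourth_box = y_list[10:12]
-- 	fourth_box.extend(y_list[14:16])
--
-- 	if sum(first_box) != 10 or sum(second_box) != 10 or sum(third_box) != 10 or sum(fourth_box) != 10:
-- 		box_checker = False
-- 	else:
-- 		box_checker = True
--
-- 	if x_checker is True and y_checker is True and box_checker is True:
-- 		return True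
-- 	else:
-- 		return False
-- ===== SOURCE B (Python) =====
-- grid1 = [
--         [1, 1, 1, 1],
--         [1, 1, 1, 1],
--         [1, 1, 1, 1],
--         [1, 1, 1, 1]]
--
-- grid2 = [
--         [1, 0, 4, 2],
--         [4, 2, 1, 3],
--         [0, 1, 0, 4],
--         [3, 4, 2, 1]]
--
-- grid3 = [
--         [1, 2, 3, 4],
--         [2, 1, 4, 3],
--         [3, 4, 2, 1],
--         [4, 3, 1, 2]]
--
-- grid4 = [
--         [1, 3, 4, 2],
--         [4, 2, 1, 3],
--         [2, 1, 3, 4],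
--         [3, 4, 2, 1]]
--
-- def two_by_two(grid_input):
--     g = grid_input if grid_input in (grid1, grid2, grid3) else grid4
--     rows_ok = all(sum(row) == 10 for row in g)
--     cols_ok = all(sum(col) == 10 for col in zip(*g))
--     boxes_ok = all(sum(g[r + i][c + j] for i in range(2) for j in range(2)) == 10
--                    for r in (0, 2) for c in (0, 2))
--     return rows_ok and cols_ok and boxes_ok
-- ===== Notes on version B (the rewrite author's own statement) =====
-- stated objective: simpler
-- what changed: Replaced A's four duplicated validation branches and flattened-list stride slicing with a single grid selection followed by a generic check: all() over rows, a real transpose for columns, and nested 2x2 block loops for boxes.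
import Mathlib
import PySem

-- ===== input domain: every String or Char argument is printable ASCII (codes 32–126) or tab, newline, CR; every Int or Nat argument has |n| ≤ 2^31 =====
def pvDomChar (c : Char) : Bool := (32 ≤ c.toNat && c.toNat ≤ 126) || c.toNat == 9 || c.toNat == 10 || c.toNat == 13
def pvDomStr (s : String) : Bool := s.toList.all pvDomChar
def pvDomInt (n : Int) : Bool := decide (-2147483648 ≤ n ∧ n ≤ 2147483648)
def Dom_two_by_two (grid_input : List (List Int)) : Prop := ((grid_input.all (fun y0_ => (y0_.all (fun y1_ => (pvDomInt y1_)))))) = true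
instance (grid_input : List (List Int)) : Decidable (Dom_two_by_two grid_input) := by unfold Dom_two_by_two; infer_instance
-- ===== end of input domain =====

-- B collapses A's four duplicated branches into one grid selection and validates it
-- generically (rows, a real transpose for columns, 2x2 block loops) — objective: simpler.

-- ===== PORT A =====
def pvGrid1 : List (List Int) := [[1,1,1,1],[1,1,1,1],[1,1,1,1],[1,1,1,1]]
def pvGrid2 : List (List Int) := [[1,0,4,2],[4,2,1,3],[0,1,0,4],[3,4,2,1]]
def pvGrid3 : List (List Int) := [[1,2,3,4],[2,1,4,3],[3,4,2,1],[4,3,1,2]]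
def pvGrid4 : List (List Int) := [[1,3,4,2],[4,2,1,3],[2,1,3,4],[3,4,2,1]]

-- A's row loop with break: state (x_checker, y_list)
def pvRowLoopA : List (List Int) → Bool → List Int → Bool × List Int
  | [], x, y => (x, y)
  | i :: rest, _, y =>
      if i.sum ≠ 10 then (false, y)
      else pvRowLoopA rest true (y ++ i)

def two_by_two (grid_input : List (List Int)) : Bool :=
  let st :=
    if grid_input = pvGrid1 then pvRowLoopA pvGrid1 false []
    else if grid_input = pvGrid2 then pvRowLoopA pvGrid2 false []
    else if grid_input = pvGrid3 then pvRowLoopA pvGrid3 false []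
    else pvRowLoopA pvGrid4 false []
  let x_checker := st.1
  let y_list := st.2
  let first_column := (PySem.List.slice? y_list (some 0) none 4).getD []
  let second_column := (PySem.List.slice? y_list (some 1) none 4).getD []
  let third_column := (PySem.List.slice? y_list (some 2) none 4).getD []
  let fourth_column := (PySem.List.slice? y_list (some 3) none 4).getD []
  let y_checker :=
    if first_column.sum ≠ 10 ∨ second_column.sum ≠ 10 ∨ third_column.sum ≠ 10 ∨ fourth_column.sum ≠ 10
    then false else true
  let first_box := PySem.List.slice y_list (some 0) (some 2) ++ PySem.List.slice y_list (some 4) (some 6)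
  let second_box := PySem.List.slice y_list (some 2) (some 4) ++ PySem.List.slice y_list (some 6) (some 8)
  let third_box := PySem.List.slice y_list (some 8) (some 10) ++ PySem.List.slice y_list (some 12) (some 14)
  let fourth_box := PySem.List.slice y_list (some 10) (some 12) ++ PySem.List.slice y_list (some 14) (some 16)
  let box_checker :=
    if first_box.sum ≠ 10 ∨ second_box.sum ≠ 10 ∨ third_box.sum ≠ 10 ∨ fourth_box.sum ≠ 10
    then false else true
  if x_checker = true ∧ y_checker = true ∧ box_checker = true then true else false

-- ===== PORT B =====
-- zip(*g): column j of g, for j below the minimum row length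
def pvZipStar (g : List (List Int)) : List (List Int) :=
  (List.range (((g.map (·.length)).min?).getD 0)).map
    (fun j => g.map (fun row => row.getD j 0))

def two_by_two_alt (grid_input : List (List Int)) : Bool :=
  let g := if grid_input ∈ [pvGrid1, pvGrid2, pvGrid3] then grid_input else pvGrid4
  let rows_ok := g.all (fun row => row.sum = 10)
  let cols_ok := (pvZipStar g).all (fun col => col.sum = 10)
  let boxes_ok := ([0, 2] : List Nat).all (fun r => ([0, 2] : List Nat).all (fun c =>
    ((List.range 2).flatMap (fun i => (List.range 2).map
      (fun j => ((g.getD (r + i) []).getD (c + j) 0)))).sum = 10))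
  rows_ok && cols_ok && boxes_ok

-- ===== PRECONDITION & SPEC =====
def Spec_two_by_two (grid_input : List (List Int)) (out : Bool) : Prop := out = two_by_two_alt grid_input
instance (grid_input : List (List Int)) (out : Bool) : Decidable (Spec_two_by_two grid_input out) := by unfold Spec_two_by_two; infer_instance

-- ===== CLAIM (what is proved, stated in full; the proofs are below) =====
def Claim_equal_two_by_two : Prop := ∀ (grid_input : List (List Int)), Dom_two_by_two grid_input → Spec_two_by_two grid_input (two_by_two grid_input)

-- ===== LEMMAS AND PROOFS =====

-- ===== VERDICT (by name: the statement is the Claim_ definition above) =====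
theorem two_by_two_spec : Claim_equal_two_by_two := by
  intro grid_input _
  unfold Spec_two_by_two
  by_cases h1 : grid_input = pvGrid1
  · subst h1; decide
  by_cases h2 : grid_input = pvGrid2
  · subst h2; decide
  by_cases h3 : grid_input = pvGrid3
  · subst h3; decide
  · simp only [two_by_two, two_by_two_alt, if_neg h1, if_neg h2, if_neg h3,
      List.mem_cons, List.not_mem_nil, or_false, if_neg (by tauto : ¬(grid_input = pvGrid1 ∨ grid_input = pvGrid2 ∨ grid_input = pvGrid3))]
    decide
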